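-- pv_equiv track=rewrite | github.com/jarek108/jarvis | tests/generate_report.py | infer_detailed_name
-- ===== SOURCE A (Python) =====
-- def infer_detailed_name(model_id):
--     """Adds resolved defaults to legacy model names for transparent reporting."""
--     if not model_id or model_id == "N/A": return model_id
--
--     # If it's a combined STS loadout string (joined by _)
--     if "_" in model_id:
--         parts = model_id.split("_")
--         # Recursively infer for each part and join with +
--         return " + ".join([infer_detailed_name(p) for p in parts])
--
--     name = model_id.upper()
--     # Support legacy nativevideo flag in loadout name
--     if "NATIVEVIDEO" in name and "#NATIVE" not in name:
--         name = name.replace("NATIVEVIDEO", "#NATIVE")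
--
--     # Only infer CTX for LLM/VLM engines
--     if "#CTX=" not in name:
--         # Check if it contains LLM engine patterns
--         if "OL_" in name: name += "#CTX=4096"
--         elif "VL_" in name: name += "#CTX=16384"
--         elif "/" in name or ":" in name: # Guess it's an LLM if it has these markers
--             name += "#CTX=16384"
--
--     return name
-- ===== SOURCE B (Python) =====
-- # B: single streaming pass over the characters with a segment buffer (state machine),
-- # instead of A's recursive split-and-rejoin; each flushed segment is formatted once.
--
-- def _format_leaf(p):
--     if not p or p == "N/A":
--         return p
--     name = p.upper()
--     if "NATIVEVIDEO" in name and "#NATIVE" not in name: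
--         name = name.replace("NATIVEVIDEO", "#NATIVE")
--     if "#CTX=" not in name:
--         if "OL_" in name:
--             name += "#CTX=4096"
--         elif "VL_" in name:
--             name += "#CTX=16384"
--         elif "/" in name or ":" in name:
--             name += "#CTX=16384"
--     return name
--
-- def infer_detailed_name(model_id):
--     if not model_id or model_id == "N/A":
--         return model_id
--     pieces = []
--     buf = []
--     for ch in model_id + "_":  # sentinel flushes the final segment
--         if ch == "_":
--             pieces.append(_format_leaf("".join(buf)))
--             buf = []
--         else:
--             buf.append(ch)
--     return " + ".join(pieces)
-- ===== Notes on version B (the rewrite author's own statement) =====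
-- stated objective: alternative
-- what changed: Replaces A's recursion (split on the underscore separator then re-enter the full function per part) with a single streaming character scan: a fold that buffers a segment, flushes and formats it at each underscore (and a sentinel at the end), then joins the collected pieces.
import Mathlib
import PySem

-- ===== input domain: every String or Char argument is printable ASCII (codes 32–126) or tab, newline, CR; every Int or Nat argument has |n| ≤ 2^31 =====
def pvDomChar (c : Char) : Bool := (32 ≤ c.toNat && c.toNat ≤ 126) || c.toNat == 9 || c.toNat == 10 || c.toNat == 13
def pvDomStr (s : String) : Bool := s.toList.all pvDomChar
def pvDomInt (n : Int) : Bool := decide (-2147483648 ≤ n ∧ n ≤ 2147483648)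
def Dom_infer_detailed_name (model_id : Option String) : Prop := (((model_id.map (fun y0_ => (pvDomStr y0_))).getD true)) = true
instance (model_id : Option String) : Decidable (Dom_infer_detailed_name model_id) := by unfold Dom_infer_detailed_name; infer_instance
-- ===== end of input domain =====

-- B replaces A's recursion (split on the underscore separator, re-enter the function per part) with a single
-- streaming character scan that buffers, flushes and formats segments (objective: alternative).

-- ===== PORT A =====
-- A recurses into itself on each part of model_id.split("_"); the fuel only makes that
-- recursion structurally total (each part is no longer than the split string, so with the
-- initial fuel length+1 the 0-fuel branch is never reached).
def inferA : Nat → String → String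
  | 0, s => s
  | fuel+1, s =>
    if s = "" ∨ s = "N/A" then s
    else if PySem.Str.isIn "_" s then
      PySem.Str.join " + " (((PySem.Str.split? s "_").getD []).map (fun p => inferA fuel p))
    else
      let name := PySem.Str.upper s
      let name := if PySem.Str.isIn "NATIVEVIDEO" name ∧ ¬ PySem.Str.isIn "#NATIVE" name
                  then PySem.Str.replace name "NATIVEVIDEO" "#NATIVE" else name
      if ¬ PySem.Str.isIn "#CTX=" name then
        if PySem.Str.isIn "OL_" name then name ++ "#CTX=4096"
        else if PySem.Str.isIn "VL_" name then name ++ "#CTX=16384"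
        else if PySem.Str.isIn "/" name ∨ PySem.Str.isIn ":" name then name ++ "#CTX=16384"
        else name
      else name

def infer_detailed_name (model_id : Option String) : Option String :=
  match model_id with
  | none => none
  | some s => some (inferA (s.toList.length + 1) s)

-- ===== PORT B =====
-- Source B's leaf formatter for one buffered segment.
def leafB (p : String) : String :=
  if p = "" ∨ p = "N/A" then p
  else
    let name := PySem.Str.upper p
    let name := if PySem.Str.isIn "NATIVEVIDEO" name ∧ ¬ PySem.Str.isIn "#NATIVE" name
                then PySem.Str.replace name "NATIVEVIDEO" "#NATIVE" else name
    if ¬ PySem.Str.isIn "#CTX=" name then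
      if PySem.Str.isIn "OL_" name then name ++ "#CTX=4096"
      else if PySem.Str.isIn "VL_" name then name ++ "#CTX=16384"
      else if PySem.Str.isIn "/" name ∨ PySem.Str.isIn ":" name then name ++ "#CTX=16384"
      else name
    else name

-- one step of Source B's for-loop: state is (pieces, buf)
def stepB (st : List String × List Char) (c : Char) : List String × List Char :=
  if c = '_' then (st.1 ++ [leafB (String.ofList st.2)], []) else (st.1, st.2 ++ [c])

def infer_detailed_name_alt (model_id : Option String) : Option String :=
  match model_id with
  | none => none
  | some s =>
    if s = "" ∨ s = "N/A" then some s
    else some (PySem.Str.join " + " (((s.toList ++ ['_']).foldl stepB ([], [])).1))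

-- ===== PRECONDITION & SPEC =====
def Spec_infer_detailed_name (model_id : Option String) (out : Option String) : Prop := out = infer_detailed_name_alt model_id
instance (model_id : Option String) (out : Option String) : Decidable (Spec_infer_detailed_name model_id out) := by unfold Spec_infer_detailed_name; infer_instance

-- ===== CLAIM (what is proved, stated in full; the proofs are below) =====
def Claim_equal_infer_detailed_name : Prop := ∀ (model_id : Option String), Dom_infer_detailed_name model_id → Spec_infer_detailed_name model_id (infer_detailed_name model_id)

-- ===== LEMMAS AND PROOFS =====

-- B's scan (with the '_' sentinel) computes exactly leafB mapped over splitOn's chunks.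
lemma scan_go : ∀ (fuel : Nat) (l cur : List Char) (acc : List (List Char)),
    l.length ≤ fuel →
    (l ++ ['_']).foldl stepB (acc.reverse.map (fun q => leafB (String.ofList q)), cur.reverse)
      = ((PySem.Chars.splitOn.go ['_'] fuel l cur acc).map (fun q => leafB (String.ofList q)), []) := by
  intro fuel
  induction fuel with
  | zero =>
    intro l cur acc hl
    have hln : l = [] := List.eq_nil_of_length_eq_zero (Nat.le_zero.mp hl)
    subst hln
    simp [PySem.Chars.splitOn.go, stepB, List.foldl]
  | succ fuel ih =>
    intro l cur acc hl
    cases l with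
    | nil => simp [PySem.Chars.splitOn.go, stepB, List.foldl]
    | cons c rest =>
      rw [PySem.Chars.splitOn.go]
      by_cases hc : c = '_'
      · subst hc
        have hpre : List.isPrefixOf ['_'] ('_' :: rest) = true := by simp [List.isPrefixOf]
        rw [if_pos hpre]
        have := ih rest [] (cur.reverse :: acc) (by simpa using Nat.le_of_succ_le_succ hl)
        simpa [stepB, List.foldl] using this
      · have hpre : List.isPrefixOf ['_'] (c :: rest) = false := by
          simp [List.isPrefixOf]; exact fun h => hc h.symm
        rw [if_neg (by simp [hpre])]
        have := ih rest (c :: cur) acc (Nat.le_of_succ_le_succ hl)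
        simpa [stepB, List.foldl, hc] using this

-- Every chunk splitOn.go produces with separator "_" is free of '_'.
lemma go_no_us : ∀ (fuel : Nat) (l cur : List Char) (acc : List (List Char)),
    l.length ≤ fuel → '_' ∉ cur → (∀ q ∈ acc, '_' ∉ q) →
    ∀ p ∈ PySem.Chars.splitOn.go ['_'] fuel l cur acc, '_' ∉ p := by
  intro fuel
  induction fuel with
  | zero =>
    intro l cur acc hl hc ha p hp
    have hln : l = [] := List.eq_nil_of_length_eq_zero (Nat.le_zero.mp hl)
    subst hln
    simp [PySem.Chars.splitOn.go] at hp
    rcases hp with h | h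
    · exact ha _ h
    · subst h; simpa using hc
  | succ fuel ih =>
    intro l cur acc hl hc ha p hp
    cases l with
    | nil =>
      simp [PySem.Chars.splitOn.go] at hp
      rcases hp with h | h
      · exact ha _ h
      · subst h; simpa using hc
    | cons c rest =>
      rw [PySem.Chars.splitOn.go] at hp
      by_cases hpre : List.isPrefixOf ['_'] (c :: rest) = true
      · rw [if_pos hpre] at hp
        refine ih _ _ _ ?_ (by simp) ?_ p hp
        · simpa using Nat.le_of_succ_le_succ hl
        · intro q hq
          rcases List.mem_cons.mp hq with h | h
          · subst h; simpa using hc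
          · exact ha _ h
      · rw [if_neg hpre] at hp
        have hcne : c ≠ '_' := by
          intro h; subst h; simp [List.isPrefixOf] at hpre
        refine ih _ _ _ (Nat.le_of_succ_le_succ hl) ?_ ha p hp
        intro h
        rcases List.mem_cons.mp h with h | h
        · exact hcne h.symm
        · exact hc h

lemma splitOn_no_us (l : List Char) : ∀ p ∈ PySem.Chars.splitOn l ['_'], '_' ∉ p :=
  go_no_us (l.length + 1) l [] [] (by omega) (by simp) (by simp)

lemma isIn_us_false (t : String) : PySem.Str.isIn "_" t = false ↔ '_' ∉ t.toList := by
  rw [← Bool.not_eq_true, PySem.Str.isIn_iff_infix]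
  have h : ("_" : String).toList = ['_'] := rfl
  rw [h, List.singleton_infix_iff]

-- On an underscore-free part, one step of A's recursion is exactly B's leaf formatter.
lemma inferA_leaf (fuel : Nat) (s : String) (hu : PySem.Str.isIn "_" s = false) :
    inferA (fuel+1) s = leafB s := by
  rw [inferA, leafB]
  by_cases hg : s = "" ∨ s = "N/A"
  · simp [hg]
  · rw [if_neg hg, if_neg hg, hu]
    simp only [Bool.false_eq_true, if_false]

-- splitOn of an underscore-free list is the singleton of the list itself.
lemma go_single : ∀ (fuel : Nat) (l cur : List Char) (acc : List (List Char)),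
    l.length ≤ fuel → '_' ∉ l →
    PySem.Chars.splitOn.go ['_'] fuel l cur acc = (( cur.reverse ++ l) :: acc).reverse := by
  intro fuel
  induction fuel with
  | zero =>
    intro l cur acc hl _
    have hln : l = [] := List.eq_nil_of_length_eq_zero (Nat.le_zero.mp hl)
    subst hln
    simp [PySem.Chars.splitOn.go]
  | succ fuel ih =>
    intro l cur acc hl hno
    cases l with
    | nil => simp [PySem.Chars.splitOn.go]
    | cons c rest =>
      have hcne : c ≠ '_' := by intro h; exact hno (h ▸ List.mem_cons_self ..)
      rw [PySem.Chars.splitOn.go, if_neg (by simp [List.isPrefixOf]; exact fun h => hcne h.symm)]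
      rw [ih rest (c :: cur) acc (Nat.le_of_succ_le_succ hl)
            (fun h => hno (List.mem_cons_of_mem _ h))]
      simp

lemma splitOn_single (l : List Char) (hno : '_' ∉ l) :
    PySem.Chars.splitOn l ['_'] = [l] := by
  rw [PySem.Chars.splitOn, go_single (l.length + 1) l [] [] (by omega) hno]
  simp

-- ===== VERDICT (by name: the statement is the Claim_ definition above) =====
theorem infer_detailed_name_spec : Claim_equal_infer_detailed_name := by
  intro m _
  unfold Spec_infer_detailed_name
  cases m with
  | none => rfl
  | some s =>
    simp only [infer_detailed_name, infer_detailed_name_alt]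
    by_cases hg : s = "" ∨ s = "N/A"
    · rw [inferA, if_pos hg, if_pos hg]
    · rw [if_neg hg]
      have hscan := scan_go (s.toList.length + 1) s.toList [] [] (by omega)
      simp only [List.reverse_nil, List.map_nil] at hscan
      rw [hscan]
      have hgo : PySem.Chars.splitOn.go ['_'] (s.toList.length + 1) s.toList [] []
          = PySem.Chars.splitOn s.toList ['_'] := rfl
      rw [hgo]
      by_cases hu : PySem.Str.isIn "_" s = true
      · obtain ⟨k, hk⟩ : ∃ k, s.toList.length = k + 1 := by
          have hmem : '_' ∈ s.toList := by
            have := (PySem.Str.isIn_iff_infix (sub := "_") (s := s)).mp hu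
            simpa [List.singleton_infix_iff] using this
          cases hL : s.toList with
          | nil => rw [hL] at hmem; simp at hmem
          | cons a t => exact ⟨t.length, List.length_cons ..⟩
        rw [inferA, if_neg hg, if_pos hu]
        have hsplit : PySem.Str.split? s "_" = some ((PySem.Chars.splitOn s.toList ['_']).map String.ofList) := by
          simp [PySem.Str.split?, PySem.Chars.split?]
        rw [hsplit]
        simp only [Option.getD_some, List.map_map]
        congr 1
        congr 1
        apply List.map_congr_left
        intro q hq
        have hqs : PySem.Str.isIn "_" (String.ofList q) = false := by
          rw [isIn_us_false, String.toList_ofList]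
          exact splitOn_no_us s.toList q hq
        show inferA s.toList.length (String.ofList q) = leafB (String.ofList q)
        rw [hk]
        exact inferA_leaf k _ hqs
      · have hu' : PySem.Str.isIn "_" s = false := by simpa using hu
        have hmem : '_' ∉ s.toList := (isIn_us_false s).mp hu'
        rw [inferA_leaf s.toList.length s hu', splitOn_single s.toList hmem]
        simp [PySem.Str.join, PySem.Chars.join, List.intercalate]
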